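-- pv_equiv track=rewrite | github.com/DragonOfShuu/KSLHax | components/car_item.py | _isolate_image_name
-- ===== SOURCE A (Python) =====
-- def _isolate_image_name(image_url: str):
--     '''
--     Isolate the image name from
--     the url.
--
--     Example
--     -
--     >>> _isolate_image_name('https://img.ksl.com/mx/mplace-cars.ksl.com/4826222-1684201630-965743.jpeg')
--     '4826222-1684201630-965743.jpeg'
--     '''
--     found_start: bool = False
--     returnable: str = ""
--     # loop through the url from
--     # the beginning until a number
--     # is found
--     for i in image_url:
--         if not (found_start or i.isnumeric()): continue
--         # Start adding each part of
--         # the image to the returnable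
--         returnable+=i
--         found_start=True
--     return returnable
-- ===== SOURCE B (Python) =====
-- def _isolate_image_name(image_url: str):
--     idx = next((i for i, c in enumerate(image_url) if c.isnumeric()), None)
--     return image_url[idx:] if idx is not None else ""
-- ===== Notes on version B (the rewrite author's own statement) =====
-- stated objective: simpler
-- what changed: Replaces the per-character flag-and-concatenate loop (quadratic string appends) with a single boundary-finding scan plus one slice.
import Mathlib
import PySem

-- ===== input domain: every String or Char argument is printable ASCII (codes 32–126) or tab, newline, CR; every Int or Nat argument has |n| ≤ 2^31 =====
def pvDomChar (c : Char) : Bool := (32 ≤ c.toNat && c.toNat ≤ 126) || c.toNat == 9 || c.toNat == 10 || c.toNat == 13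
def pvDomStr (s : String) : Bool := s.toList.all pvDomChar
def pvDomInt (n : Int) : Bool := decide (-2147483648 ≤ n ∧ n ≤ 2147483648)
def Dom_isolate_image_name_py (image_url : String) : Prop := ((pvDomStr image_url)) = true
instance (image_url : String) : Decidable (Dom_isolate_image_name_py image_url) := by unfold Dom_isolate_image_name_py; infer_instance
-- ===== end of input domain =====

-- B replaces A's flag-and-concatenate loop by finding the first numeric index and slicing once (simpler).
-- On the printable-ASCII domain, Python's str.isnumeric coincides with isdigit; both ports use PySem.Chars.isdigit.

-- ===== PORT A =====
-- the for-loop with state (found_start, returnable)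
def isolateGoA : List Char → Bool → List Char → List Char
  | [], _, returnable => returnable
  | c :: rest, found_start, returnable =>
    if !(found_start || PySem.Chars.isdigit c) then isolateGoA rest found_start returnable
    else isolateGoA rest true (returnable ++ [c])

def isolate_image_name_py (image_url : String) : String :=
  String.mk (isolateGoA image_url.toList false [])

-- ===== PORT B =====
def isolate_image_name_py_alt (image_url : String) : String :=
  match image_url.toList.findIdx? (fun c => PySem.Chars.isdigit c) with
  | some i => String.mk (image_url.toList.drop i)   -- image_url[idx:]
  | none => ""

-- ===== PRECONDITION & SPEC =====
def Spec_isolate_image_name_py (image_url : String) (out : String) : Prop := out = isolate_image_name_py_alt image_url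
instance (image_url : String) (out : String) : Decidable (Spec_isolate_image_name_py image_url out) := by unfold Spec_isolate_image_name_py; infer_instance

-- ===== CLAIM (what is proved, stated in full; the proofs are below) =====
def Claim_equal_isolate_image_name_py : Prop := ∀ (image_url : String), Dom_isolate_image_name_py image_url → Spec_isolate_image_name_py image_url (isolate_image_name_py image_url)

-- ===== LEMMAS AND PROOFS =====
theorem isolateGoA_found (l : List Char) : ∀ acc, isolateGoA l true acc = acc ++ l := by
  induction l with
  | nil => intro acc; simp [isolateGoA]
  | cons c rest ih => intro acc; simp [isolateGoA, ih]

theorem isolateGoA_eq_findIdx (l : List Char) :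
    isolateGoA l false [] =
      (match l.findIdx? (fun c => PySem.Chars.isdigit c) with
       | some i => l.drop i
       | none => ([] : List Char)) := by
  induction l with
  | nil => simp [isolateGoA]
  | cons c rest ih =>
    by_cases h : PySem.Chars.isdigit c
    · simp [isolateGoA, h, List.findIdx?_cons, isolateGoA_found]
    · simp [isolateGoA, h, ih, List.findIdx?_cons]
      cases rest.findIdx? (fun c => PySem.Chars.isdigit c) <;> simp <;> rfl

-- ===== VERDICT (by name: the statement is the Claim_ definition above) =====
theorem isolate_image_name_py_spec : Claim_equal_isolate_image_name_py := by
  intro s _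
  unfold Spec_isolate_image_name_py isolate_image_name_py isolate_image_name_py_alt
  rw [isolateGoA_eq_findIdx]
  cases s.toList.findIdx? (fun c => PySem.Chars.isdigit c) <;> simp <;> rfl
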